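-- pv_equiv track=rewrite | github.com/TomLouwers/websitesara | tools/new/progress_report.py | parse_path_metadata
-- ===== SOURCE A (Python) =====
-- from typing import Any, Dict, List, Tuple
--
-- def parse_path_metadata(path: str) -> Dict[str, str]:
--     """
--     Extract domain, groep, level, topic from:
--     content/nl-NL/<domain>/groep-6/n2/topics/<topic>/exercises.json
--     """
--     p = path.replace("\\", "/")
--     parts = p.split("/")
--
--     meta = {"domain": "", "group": "", "level": "", "topic": ""}
--
--     # domain is after nl-NL
--     if "nl-NL" in parts:
--         i = parts.index("nl-NL")
--         if i + 1 < len(parts):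
--             meta["domain"] = parts[i + 1]
--
--     # group and level
--     for part in parts:
--         if part.startswith("groep-"):
--             meta["group"] = part
--         if part in ("n1", "n2", "n3", "n4"):
--             meta["level"] = part
--
--     # topic slug
--     if "topics" in parts:
--         j = parts.index("topics")
--         if j + 1 < len(parts):
--             meta["topic"] = parts[j + 1]
--
--     return meta
-- ===== SOURCE B (Python) =====
-- def parse_path_metadata(path: str):
--     """Single pairwise pass: no .index scans; first-occurrence flags for
--     domain/topic (set from the element after the first 'nl-NL'/'topics'),
--     last match wins for group/level."""
--     parts = path.replace("\\", "/").split("/")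
--     meta = {"domain": "", "group": "", "level": "", "topic": ""}
--     domain_set = False
--     topic_set = False
--     prev = None
--     for part in parts:
--         if prev == "nl-NL" and not domain_set:
--             meta["domain"] = part
--             domain_set = True
--         if prev == "topics" and not topic_set:
--             meta["topic"] = part
--             topic_set = True
--         if part.startswith("groep-"):
--             meta["group"] = part
--         if part in ("n1", "n2", "n3", "n4"):
--             meta["level"] = part
--         prev = part
--     return meta
-- ===== Notes on version B (the rewrite author's own statement) =====
-- stated objective: simpler
-- what changed: Replaced A's two membership+.index scans and a separate group/level loop by a single pairwise pass over the segments, using first-occurrence flags for domain/topic and last-match-wins updates for group/level.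
import Mathlib
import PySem

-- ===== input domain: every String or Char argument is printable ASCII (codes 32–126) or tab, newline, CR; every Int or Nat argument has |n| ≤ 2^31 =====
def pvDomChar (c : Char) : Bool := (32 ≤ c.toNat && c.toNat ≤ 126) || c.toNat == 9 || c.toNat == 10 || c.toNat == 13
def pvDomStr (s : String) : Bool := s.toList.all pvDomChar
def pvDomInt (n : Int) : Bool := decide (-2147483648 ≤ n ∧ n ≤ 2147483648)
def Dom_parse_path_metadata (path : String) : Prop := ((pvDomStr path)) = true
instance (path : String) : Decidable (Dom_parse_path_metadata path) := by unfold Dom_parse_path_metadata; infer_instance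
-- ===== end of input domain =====

-- B replaces A's two .index scans plus a separate loop by ONE pairwise pass with
-- first-occurrence flags (objective: simpler decomposition, same asymptotic cost).

-- ===== PORT A =====
def parse_path_metadata (path : String) : List (String × String) :=
  let p := PySem.Str.replace path "\\" "/"
  let parts := (PySem.Str.split? p "/").getD []   -- sep "/" ≠ "", so split? is always some
  let m : PySem.Dict String String :=
    PySem.Dict.ofList [("domain", ""), ("group", ""), ("level", ""), ("topic", "")]
  -- 'if "nl-NL" in parts: i = parts.index("nl-NL"); …' — index? is none exactly when not a member
  let m :=
    match PySem.List.index? parts "nl-NL" with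
    | some i =>
        if (i : Int) + 1 < PySem.List.len parts then
          m.insert "domain" (PySem.List.pyGetD parts ((i : Int) + 1) "")
        else m
    | none => m
  let m := parts.foldl (fun m part =>
    let m := if PySem.Str.startswith part "groep-" then m.insert "group" part else m
    if part == "n1" || part == "n2" || part == "n3" || part == "n4" then
      m.insert "level" part
    else m) m
  let m :=
    match PySem.List.index? parts "topics" with
    | some j =>
        if (j : Int) + 1 < PySem.List.len parts then
          m.insert "topic" (PySem.List.pyGetD parts ((j : Int) + 1) "")
        else m
    | none => m
  m.items

-- ===== PORT B =====
def parse_path_metadata_alt (path : String) : List (String × String) :=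
  let parts := (PySem.Str.split? (PySem.Str.replace path "\\" "/") "/").getD []
  let st := parts.foldl (fun st part =>
    let (m, dset, tset, prev) := st
    let (m, dset) :=
      if prev == some "nl-NL" && !dset then (m.insert "domain" part, true) else (m, dset)
    let (m, tset) :=
      if prev == some "topics" && !tset then (m.insert "topic" part, true) else (m, tset)
    let m := if PySem.Str.startswith part "groep-" then m.insert "group" part else m
    let m :=
      if part == "n1" || part == "n2" || part == "n3" || part == "n4" then
        m.insert "level" part
      else m
    (m, dset, tset, some part))
    (PySem.Dict.ofList [("domain", ""), ("group", ""), ("level", ""), ("topic", "")],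
     false, false, (none : Option String))
  st.1.items

-- ===== PRECONDITION & SPEC =====
def Spec_parse_path_metadata (path : String) (out : List (String × String)) : Prop := out = parse_path_metadata_alt path
instance (path : String) (out : List (String × String)) : Decidable (Spec_parse_path_metadata path out) := by unfold Spec_parse_path_metadata; infer_instance

-- ===== CLAIM (what is proved, stated in full; the proofs are below) =====
def Claim_equal_parse_path_metadata : Prop := ∀ (path : String), Dom_parse_path_metadata path → Spec_parse_path_metadata path (parse_path_metadata path)

-- ===== LEMMAS AND PROOFS =====

-- the four-key dict both programs maintain
def mk4 (d g l t : String) : PySem.Dict String String :=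
  PySem.Dict.ofList [("domain", d), ("group", g), ("level", l), ("topic", t)]

theorem mk4_insert_domain (d g l t x : String) : (mk4 d g l t).insert "domain" x = mk4 x g l t := rfl
theorem mk4_insert_group (d g l t x : String) : (mk4 d g l t).insert "group" x = mk4 d x l t := rfl
theorem mk4_insert_level (d g l t x : String) : (mk4 d g l t).insert "level" x = mk4 d g x t := rfl
theorem mk4_insert_topic (d g l t x : String) : (mk4 d g l t).insert "topic" x = mk4 d g l x := rfl

-- value following the FIRST occurrence of `key`, as B's armed/flagged pass computes it
def fa (key : String) : Option String → List String → String → String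
  | _, [], dflt => dflt
  | prev, x :: rest, dflt => if prev == some key then x else fa key (some x) rest dflt

-- whether B's flag ends up set
def fset (key : String) : Option String → List String → Bool
  | _, [] => false
  | prev, x :: rest => prev == some key || fset key (some x) rest

def plast : Option String → List String → Option String
  | prev, [] => prev
  | _, x :: rest => plast (some x) rest

-- value following the first occurrence of `key`, as A's index? scan computes it
def aD (key : String) (parts : List String) : String :=
  match PySem.List.index? parts key with
  | some i => parts.getD (i + 1) ""
  | none => ""

theorem aDomainStep (parts : List String) (key g l t : String) :
    (match PySem.List.index? parts key with
     | some i =>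
         if (i : Int) + 1 < PySem.List.len parts then
           (mk4 "" g l t).insert "domain" (PySem.List.pyGetD parts ((i : Int) + 1) "")
         else mk4 "" g l t
     | none => mk4 "" g l t) = mk4 (aD key parts) g l t := by
  unfold aD
  cases h : PySem.List.index? parts key with
  | none => rfl
  | some i =>
    show (if (i : Int) + 1 < PySem.List.len parts then
            (mk4 "" g l t).insert "domain" (PySem.List.pyGetD parts ((i : Int) + 1) "")
          else mk4 "" g l t) = mk4 (parts.getD (i + 1) "") g l t
    have hc : ((i : Int) + 1) = ((i + 1 : Nat) : Int) := by push_cast; ring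
    rw [hc]
    by_cases hl : ((i + 1 : Nat) : Int) < PySem.List.len parts
    · rw [if_pos hl, PySem.List.pyGetD_natCast, mk4_insert_domain]
    · have hlen : parts.length ≤ i + 1 := by
        simp only [PySem.List.len_eq] at hl; omega
      rw [if_neg hl, List.getD_eq_default _ _ hlen]

theorem aTopicStep (parts : List String) (key d g l : String) :
    (match PySem.List.index? parts key with
     | some i =>
         if (i : Int) + 1 < PySem.List.len parts then
           (mk4 d g l "").insert "topic" (PySem.List.pyGetD parts ((i : Int) + 1) "")
         else mk4 d g l ""
     | none => mk4 d g l "") = mk4 d g l (aD key parts) := by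
  unfold aD
  cases h : PySem.List.index? parts key with
  | none => rfl
  | some i =>
    show (if (i : Int) + 1 < PySem.List.len parts then
            (mk4 d g l "").insert "topic" (PySem.List.pyGetD parts ((i : Int) + 1) "")
          else mk4 d g l "") = mk4 d g l (parts.getD (i + 1) "")
    have hc : ((i : Int) + 1) = ((i + 1 : Nat) : Int) := by push_cast; ring
    rw [hc]
    by_cases hl : ((i + 1 : Nat) : Int) < PySem.List.len parts
    · rw [if_pos hl, PySem.List.pyGetD_natCast, mk4_insert_topic]
    · have hlen : parts.length ≤ i + 1 := by
        simp only [PySem.List.len_eq] at hl; omega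
      rw [if_neg hl, List.getD_eq_default _ _ hlen]

-- A's group/level loop, reduced to two scalar folds
theorem aLoop (parts : List String) : ∀ d g l t : String,
    parts.foldl (fun m part =>
      let m := if PySem.Str.startswith part "groep-" then m.insert "group" part else m
      if part == "n1" || part == "n2" || part == "n3" || part == "n4" then
        m.insert "level" part
      else m) (mk4 d g l t)
    = mk4 d
        (parts.foldl (fun g part => if PySem.Str.startswith part "groep-" then part else g) g)
        (parts.foldl (fun l part =>
          if part == "n1" || part == "n2" || part == "n3" || part == "n4" then part else l) l)
        t := by
  induction parts with
  | nil => intro d g l t; rfl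
  | cons x xs ih =>
    intro d g l t
    simp only [List.foldl_cons]
    by_cases h1 : PySem.Str.startswith x "groep-" <;>
      by_cases h2 : (x == "n1" || x == "n2" || x == "n3" || x == "n4") = true <;>
      simp only [h1, h2, Bool.false_eq_true, if_true, if_false,
        mk4_insert_group, mk4_insert_level, ih]

-- B's single pass, fully characterised
set_option maxHeartbeats 2000000 in
theorem bLoop (parts : List String) : ∀ (d g l t : String) (dset tset : Bool) (prev : Option String),
    parts.foldl (fun st part =>
      let (m, dset, tset, prev) := st
      let (m, dset) :=
        if prev == some "nl-NL" && !dset then (m.insert "domain" part, true) else (m, dset)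
      let (m, tset) :=
        if prev == some "topics" && !tset then (m.insert "topic" part, true) else (m, tset)
      let m := if PySem.Str.startswith part "groep-" then m.insert "group" part else m
      let m :=
        if part == "n1" || part == "n2" || part == "n3" || part == "n4" then
          m.insert "level" part
        else m
      (m, dset, tset, some part)) (mk4 d g l t, dset, tset, prev)
    = (mk4 (if dset then d else fa "nl-NL" prev parts d)
           (parts.foldl (fun g part => if PySem.Str.startswith part "groep-" then part else g) g)
           (parts.foldl (fun l part =>
             if part == "n1" || part == "n2" || part == "n3" || part == "n4" then part else l) l)
           (if tset then t else fa "topics" prev parts t),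
       dset || fset "nl-NL" prev parts,
       tset || fset "topics" prev parts,
       plast prev parts) := by
  induction parts with
  | nil =>
    intro d g l t dset tset prev
    cases dset <;> cases tset <;> rfl
  | cons x xs ih =>
    intro d g l t dset tset prev
    simp only [List.foldl_cons, fa, fset, plast]
    by_cases hd : (prev == some "nl-NL") = true <;>
      by_cases ht : (prev == some "topics") = true <;>
      cases dset <;> cases tset <;>
      by_cases h1 : PySem.Str.startswith x "groep-" <;>
      by_cases h2 : (x == "n1" || x == "n2" || x == "n3" || x == "n4") = true <;>
      simp only [hd, ht, h1, h2, Bool.not_true, Bool.not_false, Bool.and_true, Bool.and_false,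
        Bool.true_or, Bool.false_or, Bool.true_and, Bool.false_and, if_true, if_false,
        Bool.or_false, Bool.or_true, Bool.false_eq_true,
        mk4_insert_domain, mk4_insert_topic, mk4_insert_group, mk4_insert_level, ih]

-- with default "" the two first-occurrence computations agree
theorem fa_eq_aD (parts : List String) : ∀ (key : String) (prev : Option String),
    (prev == some key) = false → fa key prev parts "" = aD key parts := by
  induction parts with
  | nil => intro key prev _; rfl
  | cons x rest ih =>
    intro key prev hprev
    simp only [fa, hprev, Bool.false_eq_true, if_false]
    by_cases hx : x = key
    · subst hx
      have h0 : PySem.List.index? (x :: rest) x = some 0 := PySem.List.index?_cons_self x rest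
      unfold aD
      rw [h0]
      cases rest with
      | nil => simp [fa]
      | cons y r => simp [fa]
    · have hne : (some x == some key) = false := by simp [hx]
      rw [ih key (some x) hne]
      have hidx : PySem.List.index? (x :: rest) key
          = (PySem.List.index? rest key).map (· + 1) :=
        PySem.List.index?_cons_of_ne rest hx
      unfold aD
      rw [hidx]
      cases h : PySem.List.index? rest key with
      | none => rfl
      | some i => simp

-- both programs, with the shared `parts` list abstracted out (the ports are
-- definitionally these bodies applied to split(replace(path)))
theorem bodies_eq (parts : List String) :
    (match PySem.List.index? parts "topics" with
     | some j =>
         if (j : Int) + 1 < PySem.List.len parts then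
           (parts.foldl (fun (m : PySem.Dict String String) part =>
              let m := if PySem.Str.startswith part "groep-" then m.insert "group" part else m
              if part == "n1" || part == "n2" || part == "n3" || part == "n4" then
                m.insert "level" part
              else m)
             (match PySem.List.index? parts "nl-NL" with
              | some i =>
                  if (i : Int) + 1 < PySem.List.len parts then
                    (mk4 "" "" "" "").insert "domain" (PySem.List.pyGetD parts ((i : Int) + 1) "")
                  else mk4 "" "" "" ""
              | none => mk4 "" "" "" "")).insert "topic" (PySem.List.pyGetD parts ((j : Int) + 1) "")
         else
           parts.foldl (fun (m : PySem.Dict String String) part =>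
              let m := if PySem.Str.startswith part "groep-" then m.insert "group" part else m
              if part == "n1" || part == "n2" || part == "n3" || part == "n4" then
                m.insert "level" part
              else m)
             (match PySem.List.index? parts "nl-NL" with
              | some i =>
                  if (i : Int) + 1 < PySem.List.len parts then
                    (mk4 "" "" "" "").insert "domain" (PySem.List.pyGetD parts ((i : Int) + 1) "")
                  else mk4 "" "" "" ""
              | none => mk4 "" "" "" "")
     | none =>
         parts.foldl (fun (m : PySem.Dict String String) part =>
            let m := if PySem.Str.startswith part "groep-" then m.insert "group" part else m
            if part == "n1" || part == "n2" || part == "n3" || part == "n4" then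
              m.insert "level" part
            else m)
           (match PySem.List.index? parts "nl-NL" with
            | some i =>
                if (i : Int) + 1 < PySem.List.len parts then
                  (mk4 "" "" "" "").insert "domain" (PySem.List.pyGetD parts ((i : Int) + 1) "")
                else mk4 "" "" "" ""
            | none => mk4 "" "" "" "")).items
    = (parts.foldl (fun (st : PySem.Dict String String × Bool × Bool × Option String) part =>
        let (m, dset, tset, prev) := st
        let (m, dset) :=
          if prev == some "nl-NL" && !dset then (m.insert "domain" part, true) else (m, dset)
        let (m, tset) :=
          if prev == some "topics" && !tset then (m.insert "topic" part, true) else (m, tset)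
        let m := if PySem.Str.startswith part "groep-" then m.insert "group" part else m
        let m :=
          if part == "n1" || part == "n2" || part == "n3" || part == "n4" then
            m.insert "level" part
          else m
        (m, dset, tset, some part)) (mk4 "" "" "" "", false, false, (none : Option String))).1.items := by
  rw [bLoop]
  rw [aDomainStep, aLoop]
  have htop := aTopicStep parts "topics"
      (aD "nl-NL" parts)
      (parts.foldl (fun g part => if PySem.Str.startswith part "groep-" then part else g) "")
      (parts.foldl (fun l part =>
        if part == "n1" || part == "n2" || part == "n3" || part == "n4" then part else l) "")
  rw [htop]
  simp only [Bool.false_eq_true, if_false]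
  rw [fa_eq_aD parts "nl-NL" none rfl, fa_eq_aD parts "topics" none rfl]

-- ===== VERDICT (by name: the statement is the Claim_ definition above) =====
set_option maxHeartbeats 4000000 in
theorem parse_path_metadata_spec : Claim_equal_parse_path_metadata := by
  intro path _
  show parse_path_metadata path = parse_path_metadata_alt path
  exact bodies_eq ((PySem.Str.split? (PySem.Str.replace path "\\" "/") "/").getD [])
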